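-- pv_equiv track=rewrite | github.com/anastasia-nikon/omd | aa_academy/homework2.py | not_unique_count
-- ===== SOURCE A (Python) =====
-- def not_unique_count(tuple):
--     new_list=[]
--     count=0
--     for i in tuple:
--         if i in new_list:
--             count+=1
--         else:
--             new_list.append(i)
--     return count
-- ===== SOURCE B (Python) =====
-- def not_unique_count(tuple):
--     return len(tuple) - len(set(tuple))
-- ===== Notes on version B (the rewrite author's own statement) =====
-- stated objective: simpler
-- what changed: Replaces the scan with a membership list and counter by the closed form len(tuple) - len(set(tuple)): no loop, no branch, no accumulator.
import Mathlib
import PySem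

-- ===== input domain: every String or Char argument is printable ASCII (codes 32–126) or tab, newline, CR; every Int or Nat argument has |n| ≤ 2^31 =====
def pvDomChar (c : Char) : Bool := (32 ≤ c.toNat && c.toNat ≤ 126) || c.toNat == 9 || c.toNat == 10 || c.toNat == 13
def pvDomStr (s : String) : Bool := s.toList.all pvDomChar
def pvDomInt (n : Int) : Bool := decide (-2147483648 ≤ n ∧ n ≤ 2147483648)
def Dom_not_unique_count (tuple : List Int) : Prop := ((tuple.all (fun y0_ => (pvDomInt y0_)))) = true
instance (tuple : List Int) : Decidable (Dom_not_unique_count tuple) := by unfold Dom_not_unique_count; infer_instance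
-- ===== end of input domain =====

-- B replaces A's membership-scan loop by the closed form len(tuple) - len(set(tuple)).

-- ===== PORT A =====
-- loop state: (new_list, count); 'i in new_list' is a linear membership scan
def not_unique_count (tuple : List Int) : Int :=
  (tuple.foldl
    (fun (st : List Int × Int) i =>
      if st.1.contains i then (st.1, st.2 + 1) else (st.1 ++ [i], st.2))
    ([], 0)).2

-- ===== PORT B =====
def not_unique_count_alt (tuple : List Int) : Int :=
  (tuple.length : Int) - ((PySem.Set.ofList tuple).length : Int)

-- ===== PRECONDITION & SPEC =====
def Spec_not_unique_count (tuple : List Int) (out : Int) : Prop := out = not_unique_count_alt tuple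
instance (tuple : List Int) (out : Int) : Decidable (Spec_not_unique_count tuple out) := by unfold Spec_not_unique_count; infer_instance

-- ===== CLAIM (what is proved, stated in full; the proofs are below) =====
def Claim_equal_not_unique_count : Prop := ∀ (tuple : List Int), Dom_not_unique_count tuple → Spec_not_unique_count tuple (not_unique_count tuple)

-- ===== LEMMAS AND PROOFS =====

-- A's 'if i in new_list then … else append' maintains exactly PySem.Set.add on new_list;
-- the count equals the number of elements that were already present.
theorem pv_loop_inv (xs : List Int) : ∀ (s : List Int) (c : Int),
    (xs.foldl
      (fun (st : List Int × Int) i =>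
        if st.1.contains i then (st.1, st.2 + 1) else (st.1 ++ [i], st.2))
      (s, c)).2
    = c + (xs.length : Int) - ((PySem.Set.update s xs).length : Int) + (s.length : Int) := by
  induction xs with
  | nil => intro s c; simp [PySem.Set.update]
  | cons i xs ih =>
    intro s c
    by_cases h : s.contains i = true
    · have hm : i ∈ s := by simpa using h
      simp only [List.foldl_cons, h, if_pos, List.length_cons]
      rw [ih]
      have : PySem.Set.update s (i :: xs) = PySem.Set.update s xs := by
        simp [PySem.Set.update, PySem.Set.add, hm]
      rw [this]; push_cast; ring
    · simp only [List.foldl_cons, h, if_neg, Bool.false_eq_true, not_false_iff, List.length_cons]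
      have hm : i ∉ s := by simpa using h
      rw [ih]
      have : PySem.Set.update s (i :: xs) = PySem.Set.update (s ++ [i]) xs := by
        simp [PySem.Set.update, PySem.Set.add, hm]
      rw [this]; simp only [List.length_append, List.length_cons, List.length_nil]; push_cast; ring

-- ===== VERDICT (by name: the statement is the Claim_ definition above) =====
theorem not_unique_count_spec : Claim_equal_not_unique_count := by
  intro tuple _
  unfold Spec_not_unique_count not_unique_count not_unique_count_alt
  rw [pv_loop_inv]
  have : PySem.Set.update ([] : List Int) tuple = PySem.Set.ofList tuple := by
    simp [PySem.Set.update, PySem.Set.ofList_eq_foldl]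
  rw [this]; simp
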